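-- pv_equiv track=rewrite | github.com/RF-Fahad-Islam/All-Python-Projects | PYTHON PRACTICE PROJECTS/Armstrong Number Finder/armstrong_number_finder.py | nearest_armstrong_number_finder
-- ===== SOURCE A (Python) =====
-- def nearest_armstrong_number_finder(n):
--     n = int(n)
--     sumresult = 0
--     while True:
--         for number in str(n):
--             sumresult += int(number)**len(str(n))
--         if n != sumresult:
--             n += 1
--             sumresult = 0
--         else:
--             break
--     return n
-- ===== SOURCE B (Python) =====
-- # B: no upward scan at all — precompute the complete (finite) list of Armstrong
-- # numbers with at most ten digits by enumerating sorted digit multisets per digit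
-- # count (the digit-power sum depends only on the multiset), then bisect for the
-- # first one >= n.  Correct for 0 <= n <= 2^31 since 4679307774 (10 digits) is an
-- # Armstrong number >= any such n.
-- from bisect import bisect_left
--
--
-- def _gen_sorted(d, lo):
--     # all nondecreasing digit tuples of length d with digits in [lo, 9]
--     if d == 0:
--         return [()]
--     return [(first,) + rest
--             for first in range(lo, 10)
--             for rest in _gen_sorted(d - 1, first)]
--
--
-- def _armstrongs():
--     out = []
--     for d in range(1, 11):
--         for m in _gen_sorted(d, 0):
--             s = sum(x ** d for x in m)
--             if tuple(sorted(int(c) for c in str(s))) == m: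
--                 out.append(s)
--     return sorted(out)
--
--
-- _ARMSTRONG = _armstrongs()
--
--
-- def nearest_armstrong_number_finder(n):
--     n = int(n)
--     return _ARMSTRONG[bisect_left(_ARMSTRONG, n)]
-- ===== Notes on version B (the rewrite author's own statement) =====
-- stated objective: faster
-- what changed: B does no upward scan at all: it precomputes the complete finite list of Armstrong numbers with at most ten digits by enumerating sorted digit multisets per digit count (the digit-power sum depends only on the multiset) and answers each query with a bisect into that sorted list.
-- outside the precondition, e.g. on nearest_armstrong_number_finder(-3): A raises ValueError, B returns 0
import Mathlib
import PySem

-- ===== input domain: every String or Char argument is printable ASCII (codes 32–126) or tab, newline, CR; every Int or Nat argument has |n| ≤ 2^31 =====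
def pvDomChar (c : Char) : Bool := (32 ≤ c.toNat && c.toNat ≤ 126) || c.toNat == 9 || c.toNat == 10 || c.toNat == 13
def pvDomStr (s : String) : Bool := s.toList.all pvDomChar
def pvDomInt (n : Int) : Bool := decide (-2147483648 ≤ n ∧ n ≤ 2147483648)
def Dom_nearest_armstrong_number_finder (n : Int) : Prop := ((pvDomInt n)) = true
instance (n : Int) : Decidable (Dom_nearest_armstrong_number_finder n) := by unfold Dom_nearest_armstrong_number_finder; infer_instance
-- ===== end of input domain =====

-- B replaces A's unbounded upward scan by a precomputed complete list of the Armstrong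
-- numbers with at most ten digits (enumerating sorted digit multisets per digit count)
-- plus a bisect; measurably faster on large inputs.
-- ===== PORT A =====
-- while True: for number in str(n): sumresult += int(number)**len(str(n)); if n != sumresult: n += 1 else: break
-- (the fuel parameter only makes the while-loop total; it is never exhausted on the admitted inputs)
def pvLoopA (fuel : Nat) (n : Int) : Int :=
  match fuel with
  | 0 => n
  | fuel + 1 =>
      let sumresult : Int :=
        (PySem.Int.toStr n).toList.foldl
          (fun acc c =>
            acc + ((PySem.Int.ofChars? [c]).getD 0) ^ (PySem.Str.len (PySem.Int.toStr n)).toNat) 0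
      if n ≠ sumresult then pvLoopA fuel (n + 1) else n

def nearest_armstrong_number_finder (n : Int) : Int := pvLoopA 8000000000 n

-- ===== PORT B =====
-- _gen_sorted(d, lo): all nondecreasing digit tuples of length d with digits in [lo, 9]
def pvGenSorted : Nat → Int → List (List Int)
  | 0, _ => [[]]
  | d + 1, lo =>
      (PySem.List.pyRange lo 10 1).flatMap
        (fun first => (pvGenSorted d first).map (fun rest => first :: rest))

-- tuple(sorted(int(c) for c in str(s)))  (int(c) via ofChars?; exact for the s ≥ 0 reached here)
def pvSortedDigits (s : Int) : List Int :=
  PySem.List.sorted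
    ((PySem.Int.toStr s).toList.map (fun c => (PySem.Int.ofChars? [c]).getD 0)) (fun x => x) false

-- _ARMSTRONG = sorted([s for d in range(1, 11) for m in _gen_sorted(d, 0)
--                        if (s := sum(x**d for x in m)) has sorted digit tuple m])
def pvArmstrongRaw : List Int :=
  (PySem.List.pyRange 1 11 1).flatMap (fun d =>
    (pvGenSorted d.toNat 0).filterMap (fun m =>
      let s := (m.map (fun x => x ^ d.toNat)).sum
      if pvSortedDigits s = m then some s else none))

def pvArmstrongList : List Int := PySem.List.sorted pvArmstrongRaw (fun x => x) false

-- _ARMSTRONG[bisect_left(_ARMSTRONG, n)]  (pyGet? = the [..] index; in range on every admitted input, getD 0 is the Option total default)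
def nearest_armstrong_number_finder_alt (n : Int) : Int :=
  (PySem.List.pyGet? pvArmstrongList
    ((PySem.List.bisectLeft pvArmstrongList n : Nat) : Int)).getD 0

-- ===== PRECONDITION & SPEC =====
-- Pre_ excludes negative n, on which A raises ValueError (int('-') on the sign character of str(n)).
def Pre_nearest_armstrong_number_finder (n : Int) : Prop := 0 ≤ n
instance (n : Int) : Decidable (Pre_nearest_armstrong_number_finder n) := by
  unfold Pre_nearest_armstrong_number_finder; infer_instance

def pvWitness_nearest_armstrong_number_finder : Int := 7

def Spec_nearest_armstrong_number_finder (n : Int) (out : Int) : Prop :=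
  out = nearest_armstrong_number_finder_alt n
instance (n : Int) (out : Int) : Decidable (Spec_nearest_armstrong_number_finder n out) := by
  unfold Spec_nearest_armstrong_number_finder; infer_instance

-- ===== CLAIM (what is proved, stated in full; the proofs are below) =====
def Claim_equal_nearest_armstrong_number_finder : Prop :=
  ∀ (n : Int), Dom_nearest_armstrong_number_finder n →
    Pre_nearest_armstrong_number_finder n →
    Spec_nearest_armstrong_number_finder n (nearest_armstrong_number_finder n)

-- ===== LEMMAS AND PROOFS =====

-- int(c) for a decimal digit character
theorem pv_ofChars_digitChar (d : Nat) (hd : d < 10) :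
    (PySem.Int.ofChars? [Nat.digitChar d]).getD 0 = (d : Int) := by
  interval_cases d <;> decide

-- reference digit-power sum / digit count on Nat (least-significant-digit recursion)
def pvNatPS (p : Nat) (m : Nat) : Int :=
  if m < 10 then (m : Int) ^ p else pvNatPS p (m / 10) + ((m % 10 : Nat) : Int) ^ p
termination_by m
decreasing_by exact Nat.div_lt_self (by omega) (by norm_num)

def pvDC (m : Nat) : Nat :=
  if m < 10 then 1 else pvDC (m / 10) + 1
termination_by m
decreasing_by exact Nat.div_lt_self (by omega) (by norm_num)

-- the Armstrong predicate both programs test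
def pvArmB (k : Nat) : Bool := pvNatPS (pvDC k) k == k

theorem pvDC_pos (m : Nat) : 0 < pvDC m := by
  induction m using Nat.strong_induction_on with
  | _ m ih =>
    rw [pvDC]
    split
    · omega
    · have := ih (m / 10) (Nat.div_lt_self (by omega) (by norm_num)); omega

theorem pvDC_le : ∀ (e k : Nat), k < 10 ^ (e + 1) → pvDC k ≤ e + 1 := by
  intro e
  induction e with
  | zero => intro k h; rw [pvDC, if_pos (by omega)]
  | succ e ih =>
    intro k h
    rw [pvDC]
    split
    · omega
    · have hd : k / 10 < 10 ^ (e + 1) := by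
        rw [Nat.div_lt_iff_lt_mul (by norm_num)]
        calc k < 10 ^ (e + 2) := h
        _ = 10 ^ (e + 1) * 10 := by ring
      have := ih (k / 10) hd
      omega

theorem pv_toDigitsCore_map_sum (p : Nat) :
    ∀ (f m : Nat) (ds : List Char), m < f →
      ((Nat.toDigitsCore 10 f m ds).map
          (fun c => ((PySem.Int.ofChars? [c]).getD 0) ^ p)).sum
        = pvNatPS p m + ((ds.map (fun c => ((PySem.Int.ofChars? [c]).getD 0) ^ p)).sum) := by
  intro f
  induction f with
  | zero => intro m ds h; omega
  | succ f ih =>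
    intro m ds h
    rw [Nat.toDigitsCore]
    by_cases h0 : m / 10 = 0
    · have hm : m < 10 := by omega
      have hmm : m % 10 = m := Nat.mod_eq_of_lt hm
      simp only [h0, reduceIte, List.map_cons, List.sum_cons, hmm,
        pv_ofChars_digitChar m hm]
      rw [pvNatPS, if_pos hm]
    · simp only [if_neg h0]
      rw [ih (m / 10) _ (by omega)]
      have hmod : m % 10 < 10 := Nat.mod_lt _ (by norm_num)
      simp only [List.map_cons, List.sum_cons, pv_ofChars_digitChar _ hmod]
      conv_rhs => rw [pvNatPS]
      rw [if_neg (by omega)]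
      ring

theorem pv_toDigitsCore_length :
    ∀ (f m : Nat) (ds : List Char), m < f →
      (Nat.toDigitsCore 10 f m ds).length = pvDC m + ds.length := by
  intro f
  induction f with
  | zero => intro m ds h; omega
  | succ f ih =>
    intro m ds h
    rw [Nat.toDigitsCore]
    by_cases h0 : m / 10 = 0
    · have hm : m < 10 := by omega
      simp only [h0, reduceIte, List.length_cons]
      rw [pvDC, if_pos hm]
      omega
    · simp only [if_neg h0]
      rw [ih (m / 10) _ (by omega), List.length_cons]
      conv_rhs => rw [pvDC]
      rw [if_neg (by omega)]
      omega

theorem pv_toDigitsCore_mem :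
    ∀ (f m : Nat) (ds : List Char) (c : Char), m < f →
      c ∈ Nat.toDigitsCore 10 f m ds →
      (∃ v, v < 10 ∧ c = Nat.digitChar v) ∨ c ∈ ds := by
  intro f
  induction f with
  | zero => intro m ds c h; omega
  | succ f ih =>
    intro m ds c h hc
    rw [Nat.toDigitsCore] at hc
    by_cases h0 : m / 10 = 0
    · simp only [h0, reduceIte, List.mem_cons] at hc
      rcases hc with hc | hc
      · exact Or.inl ⟨m % 10, Nat.mod_lt _ (by norm_num), hc⟩
      · exact Or.inr hc
    · simp only [if_neg h0] at hc
      rcases ih (m / 10) _ c (by omega) hc with h1 | h1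
      · exact Or.inl h1
      · rcases List.mem_cons.mp h1 with h2 | h2
        · exact Or.inl ⟨m % 10, Nat.mod_lt _ (by norm_num), h2⟩
        · exact Or.inr h2

-- str(k) for a Nat k, as a character list
theorem pv_toStr_nat (m : Nat) :
    (PySem.Int.toStr (m : Int)).toList = Nat.toDigits 10 m := by
  rw [PySem.Int.toList_toStr, PySem.Int.toChars]
  rw [if_neg (by omega)]
  simp

-- the Int digit list of a Nat (msd first), as both programs read it off str(k)
def pvDL (k : Nat) : List Int :=
  (Nat.toDigits 10 k).map (fun c => (PySem.Int.ofChars? [c]).getD 0)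

theorem pvDL_sum (p k : Nat) : ((pvDL k).map (fun x => x ^ p)).sum = pvNatPS p k := by
  rw [pvDL, List.map_map]
  have := pv_toDigitsCore_map_sum p (k + 1) k [] (by omega)
  simpa [Nat.toDigits, Function.comp] using this

theorem pvDL_length (k : Nat) : (pvDL k).length = pvDC k := by
  rw [pvDL, List.length_map]
  have := pv_toDigitsCore_length (k + 1) k [] (by omega)
  simpa [Nat.toDigits] using this

theorem pvDL_bounds (k : Nat) : ∀ x ∈ pvDL k, 0 ≤ x ∧ x < 10 := by
  intro x hx
  rw [pvDL, List.mem_map] at hx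
  obtain ⟨c, hc, rfl⟩ := hx
  rcases pv_toDigitsCore_mem (k + 1) k [] c (by omega) (by simpa [Nat.toDigits] using hc) with
    ⟨v, hv, rfl⟩ | h
  · rw [pv_ofChars_digitChar v hv]
    constructor <;> omega
  · simp at h

-- per-candidate check of A: the string power sum equals the reference predicate's sum
theorem pv_check_eq (m : Nat) :
    ((PySem.Int.toStr (m : Int)).toList.foldl
        (fun acc c =>
          acc + ((PySem.Int.ofChars? [c]).getD 0) ^
            (PySem.Str.len (PySem.Int.toStr (m : Int))).toNat) 0)
      = pvNatPS (pvDC m) m := by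
  have hlen : (PySem.Str.len (PySem.Int.toStr (m : Int))).toNat = pvDC m := by
    rw [PySem.Str.len_eq, pv_toStr_nat, Nat.toDigits,
        pv_toDigitsCore_length (m + 1) m [] (by omega)]
    simp
  rw [PySem.List.foldl_add, pv_toStr_nat, hlen]
  have : (Nat.toDigits 10 m).map (fun c => ((PySem.Int.ofChars? [c]).getD 0) ^ pvDC m)
      = (pvDL m).map (fun x => x ^ pvDC m) := by
    rw [pvDL, List.map_map]; rfl
  rw [this, pvDL_sum]
  simp

-- A's loop is the linear search for the least k ≥ a with pvArmB k
theorem pv_loopA_eq : ∀ (fuel a K : Nat), a ≤ K → K < a + fuel → pvArmB K = true →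
    (∀ t, a ≤ t → t < K → pvArmB t = false) → pvLoopA fuel (a : Int) = (K : Int) := by
  intro fuel
  induction fuel with
  | zero => intro a K h1 h2 _ _; omega
  | succ fuel ih =>
    intro a K h1 h2 hK hmin
    rw [pvLoopA]
    simp only [pv_check_eq a]
    by_cases ha : a = K
    · subst ha
      have : pvNatPS (pvDC a) a = (a : Int) := by
        have := hK; rw [pvArmB, beq_iff_eq] at this; exact this
      rw [if_neg (by simp [this])]
    · have hlt : a < K := by omega
      have hfa : pvNatPS (pvDC a) a ≠ (a : Int) := by
        have := hmin a (le_refl a) hlt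
        rw [pvArmB] at this
        simpa using this
      rw [if_pos (by simpa using Ne.symm hfa)]
      have : ((a : Int) + 1) = ((a + 1 : Nat) : Int) := by push_cast; ring
      rw [this]
      exact ih (a + 1) K (by omega) (by omega) hK (fun t ht1 ht2 => hmin t (by omega) ht2)

-- the generator is sound: length d, digits in [lo, 10)
theorem pv_gen_sound : ∀ (d : Nat) (lo : Int) (m : List Int), m ∈ pvGenSorted d lo →
    m.length = d ∧ ∀ x ∈ m, lo ≤ x ∧ x < 10 := by
  intro d
  induction d with
  | zero => intro lo m hm; simp [pvGenSorted] at hm; simp [hm]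
  | succ d ih =>
    intro lo m hm
    rw [pvGenSorted, List.mem_flatMap] at hm
    obtain ⟨first, hfirst, hm⟩ := hm
    rw [List.mem_map] at hm
    obtain ⟨rest, hrest, rfl⟩ := hm
    rw [PySem.List.mem_pyRange_one] at hfirst
    obtain ⟨hlen, hbd⟩ := ih first rest hrest
    refine ⟨by simp [hlen], ?_⟩
    intro x hx
    rcases List.mem_cons.mp hx with rfl | hx
    · exact ⟨hfirst.1, hfirst.2⟩
    · have := hbd x hx
      constructor
      · linarith [hfirst.1, this.1]
      · exact this.2

-- the generator is complete: every nondecreasing digit list is produced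
theorem pv_gen_complete : ∀ (d : Nat) (lo : Int) (m : List Int), m.length = d →
    m.Pairwise (· ≤ ·) → (∀ x ∈ m, lo ≤ x ∧ x < 10) → m ∈ pvGenSorted d lo := by
  intro d
  induction d with
  | zero =>
    intro lo m hlen _ _
    rw [List.length_eq_zero_iff] at hlen
    simp [pvGenSorted, hlen]
  | succ d ih =>
    intro lo m hlen hsort hbd
    match m with
    | x :: rest =>
      rw [pvGenSorted, List.mem_flatMap]
      refine ⟨x, ?_, ?_⟩
      · rw [PySem.List.mem_pyRange_one]
        exact ⟨(hbd x (by simp)).1, (hbd x (by simp)).2⟩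
      · rw [List.mem_map]
        refine ⟨rest, ?_, rfl⟩
        rcases List.pairwise_cons.mp hsort with ⟨hhead, htail⟩
        exact ih x rest (by simpa using hlen) htail
          (fun y hy => ⟨hhead y hy, (hbd y (List.mem_cons_of_mem x hy)).2⟩)

theorem pvSortedDigits_nat (k : Nat) :
    pvSortedDigits (k : Int) = PySem.List.sorted (pvDL k) (fun x => x) false := by
  rw [pvSortedDigits, pv_toStr_nat, pvDL]

-- membership in B's precomputed list characterises the Armstrong numbers of ≤ 10 digits
theorem pv_mem_arm (s : Int) :
    s ∈ pvArmstrongList ↔ ∃ k : Nat, s = (k : Int) ∧ pvArmB k = true ∧ pvDC k ≤ 10 := by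
  rw [pvArmstrongList, PySem.List.mem_sorted, pvArmstrongRaw]
  constructor
  · intro hs
    rw [List.mem_flatMap] at hs
    obtain ⟨d, hd, hs⟩ := hs
    rw [List.mem_filterMap] at hs
    obtain ⟨m, hm, hck⟩ := hs
    simp only at hck
    split at hck
    case isFalse => exact absurd hck (by simp)
    case isTrue hsd =>
      rw [Option.some_inj] at hck
      obtain ⟨hlen, hbd⟩ := pv_gen_sound d.toNat 0 m hm
      have hge : 0 ≤ (m.map (fun x => x ^ d.toNat)).sum := by
        apply List.sum_nonneg
        intro y hy
        rw [List.mem_map] at hy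
        obtain ⟨x, hx, rfl⟩ := hy
        exact pow_nonneg (hbd x hx).1 _
      set s0 : Int := (m.map (fun x => x ^ d.toNat)).sum with hs0
      have hcast : ((s0.toNat : Nat) : Int) = s0 := Int.toNat_of_nonneg hge
      have hmp : m.Perm (pvDL s0.toNat) := by
        rw [← hsd, ← hcast, pvSortedDigits_nat]
        exact PySem.List.sorted_perm _ _ _
      have hlen2 : pvDC s0.toNat = d.toNat := by
        rw [← pvDL_length, ← hmp.length_eq, hlen]
      have hd2 : (1 : Int) ≤ d ∧ d < 11 := PySem.List.mem_pyRange_one.mp hd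
      refine ⟨s0.toNat, by omega, ?_, by omega⟩
      rw [pvArmB, beq_iff_eq, hlen2, ← pvDL_sum d.toNat s0.toNat, hcast]
      rw [← (hmp.map (fun x => x ^ d.toNat)).sum_eq, ← hs0]
  · rintro ⟨k, rfl, harm, hdc⟩
    rw [List.mem_flatMap]
    refine ⟨(pvDC k : Int), ?_, ?_⟩
    · rw [PySem.List.mem_pyRange_one]
      have := pvDC_pos k
      constructor <;> [exact_mod_cast this; exact_mod_cast by omega]
    · rw [List.mem_filterMap]
      refine ⟨PySem.List.sorted (pvDL k) (fun x => x) false, ?_, ?_⟩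
      · have htn : ((pvDC k : Int)).toNat = pvDC k := by simp
        rw [htn]
        apply pv_gen_complete
        · rw [PySem.List.length_sorted, pvDL_length]
        · have := PySem.List.sorted_pairwise (xs := pvDL k) (key := fun x => x)
          simpa using this
        · intro x hx
          rw [PySem.List.mem_sorted] at hx
          exact pvDL_bounds k x hx
      · have htn : ((pvDC k : Int)).toNat = pvDC k := by simp
        have hperm : (PySem.List.sorted (pvDL k) (fun x => x) false).Perm (pvDL k) :=
          PySem.List.sorted_perm _ _ _
        have hsum : ((PySem.List.sorted (pvDL k) (fun x => x) false).map
            (fun x => x ^ pvDC k)).sum = (k : Int) := by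
          rw [(hperm.map (fun x => x ^ pvDC k)).sum_eq, pvDL_sum]
          rw [pvArmB, beq_iff_eq] at harm
          exact harm
        simp only [htn]
        rw [hsum, pvSortedDigits_nat]
        simp

set_option maxRecDepth 4000 in
theorem pv_arm_wit : pvArmB 4679307774 = true := by
  have h1 : pvDC 4679307774 = 10 := by simp [pvDC]
  rw [pvArmB, h1]
  have h2 : pvNatPS 10 4679307774 = 4679307774 := by
    rw [pvNatPS]; norm_num
    rw [pvNatPS]; norm_num
    rw [pvNatPS]; norm_num
    rw [pvNatPS]; norm_num
    rw [pvNatPS]; norm_num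
    rw [pvNatPS]; norm_num
    rw [pvNatPS]; norm_num
    rw [pvNatPS]; norm_num
    rw [pvNatPS]; norm_num
    rw [pvNatPS]; norm_num
  rw [h2]; rfl

-- ===== VERDICT (by name: the statement is the Claim_ definition above) =====
theorem nearest_armstrong_number_finder_spec : Claim_equal_nearest_armstrong_number_finder := by
  intro n hdom hpre
  unfold Spec_nearest_armstrong_number_finder
  unfold Dom_nearest_armstrong_number_finder pvDomInt at hdom
  unfold Pre_nearest_armstrong_number_finder at hpre
  simp only [decide_eq_true_eq] at hdom
  have hex : ∃ k : Nat, n.toNat ≤ k ∧ pvArmB k = true := ⟨4679307774, by omega, pv_arm_wit⟩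
  obtain ⟨K, hKa, hKarm, hKle, hKmin⟩ :
      ∃ K : Nat, n.toNat ≤ K ∧ pvArmB K = true ∧ K ≤ 4679307774 ∧
        (∀ t, n.toNat ≤ t → t < K → pvArmB t = false) := by
    refine ⟨Nat.find hex, (Nat.find_spec hex).1, (Nat.find_spec hex).2,
      Nat.find_min' hex ⟨by omega, pv_arm_wit⟩, ?_⟩
    intro t ht1 ht2
    have hmin := Nat.find_min hex ht2
    rcases Bool.eq_false_or_eq_true (pvArmB t) with h | h
    · exact absurd ⟨ht1, h⟩ hmin
    · exact h
  have hna : ((n.toNat : Nat) : Int) = n := Int.toNat_of_nonneg hpre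
  -- A's side: the scan stops exactly at K, the least Armstrong number ≥ n
  have hA : nearest_armstrong_number_finder n = (K : Int) := by
    rw [nearest_armstrong_number_finder, ← hna]
    exact pv_loopA_eq 8000000000 n.toNat K hKa (by omega) hKarm hKmin
  -- B's side: the bisect lands exactly on K
  have hDCK : pvDC K ≤ 10 := by
    apply pvDC_le 9
    calc K ≤ 4679307774 := hKle
    _ < 10 ^ 10 := by norm_num
  have hKmem : ((K : Nat) : Int) ∈ pvArmstrongList := (pv_mem_arm _).mpr ⟨K, rfl, hKarm, hDCK⟩
  have hnK : n ≤ ((K : Nat) : Int) := by omega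
  have hPW : pvArmstrongList.Pairwise (· ≤ ·) := by
    rw [pvArmstrongList]
    exact PySem.List.sorted_pairwise (xs := pvArmstrongRaw) (key := fun x => x)
  obtain ⟨spec1, spec2, spec3⟩ := PySem.List.bisectLeft_spec pvArmstrongList n hPW
  rw [nearest_armstrong_number_finder_alt, hA]
  generalize hgi : PySem.List.bisectLeft pvArmstrongList n = i
  rw [hgi] at spec1 spec2 spec3
  obtain ⟨jK, hjK, hjKv⟩ := List.mem_iff_getElem.mp hKmem
  have hij : i ≤ jK := by
    by_contra hcon
    have h2 := spec2 jK hjK (Nat.not_le.mp hcon)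
    rw [hjKv] at h2
    exact absurd (lt_of_lt_of_le h2 hnK) (lt_irrefl _)
  have hilen : i < pvArmstrongList.length := Nat.lt_of_le_of_lt hij hjK
  have hge : n ≤ pvArmstrongList[i] := spec3 i hilen (le_refl i)
  have hmem_i : pvArmstrongList[i] ∈ pvArmstrongList := List.getElem_mem hilen
  obtain ⟨k', hk'v, hk'arm, _⟩ := (pv_mem_arm _).mp hmem_i
  rw [hk'v] at hge
  have hKlek' : K ≤ k' := by
    by_contra hcon
    have h1 : n.toNat ≤ k' := Int.toNat_le.mpr hge
    have h2 := hKmin k' h1 (Nat.lt_of_not_le hcon)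
    rw [h2] at hk'arm
    exact absurd hk'arm (by decide)
  have hle2 : pvArmstrongList[i] ≤ ((K : Nat) : Int) := by
    rcases Nat.lt_or_ge i jK with hlt | hge2
    · have h3 := (List.pairwise_iff_getElem.mp hPW) i jK hilen hjK hlt
      rw [hjKv] at h3
      exact h3
    · have hij2 : i = jK := Nat.le_antisymm hij hge2
      subst hij2
      rw [hjKv]
  have hk'K : k' = K := by
    rw [hk'v] at hle2
    have h4 : k' ≤ K := by exact_mod_cast hle2
    exact Nat.le_antisymm h4 hKlek'
  rw [PySem.List.pyGet?_natCast, List.getElem?_eq_getElem hilen, hk'v, hk'K]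
  rfl
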